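-- pv_equiv track=rewrite | github.com/makyz44/ECG | Interpolacija.py | greska
-- ===== SOURCE A (Python) =====
-- def greska(signal):
--     min=100
--     for i in range(len(signal)):
--         if signal[i]<min:
--             min=signal[i]
--     suma=0
--     for i in range(len(signal)):
--         suma=suma+(abs(signal[i]-min))
--     return suma
-- ===== SOURCE B (Python) =====
-- def greska(sig):
--     # Single online pass: keep the running minimum m and the running total of
--     # deviations; when a new minimum x appears, retroactively correct the total
--     # by k*(m - x) for the k elements already accounted for.
--     m = 100
--     suma = 0
--     for k, x in enumerate(sig):
--         if x < m:
--             suma += k * (m - x)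
--             m = x
--         suma += x - m
--     return suma
-- ===== Notes on version B (the rewrite author's own statement) =====
-- stated objective: alternative
-- what changed: B makes a single online pass over enumerate(signal) maintaining the running minimum and the running deviation total, retroactively correcting the total by k*(m-x) when a new minimum x appears, instead of A's two separate index loops (min pass, then abs-deviation pass).
import Mathlib
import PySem

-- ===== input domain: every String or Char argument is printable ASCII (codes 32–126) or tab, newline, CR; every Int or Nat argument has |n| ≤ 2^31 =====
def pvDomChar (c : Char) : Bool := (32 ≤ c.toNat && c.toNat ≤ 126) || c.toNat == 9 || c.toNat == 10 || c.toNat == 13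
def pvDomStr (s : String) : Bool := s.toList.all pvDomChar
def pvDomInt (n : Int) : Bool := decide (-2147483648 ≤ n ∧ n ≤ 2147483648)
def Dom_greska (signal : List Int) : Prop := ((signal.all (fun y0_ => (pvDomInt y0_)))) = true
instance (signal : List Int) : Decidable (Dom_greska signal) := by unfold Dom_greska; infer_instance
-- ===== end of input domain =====

-- B replaces A's two index loops (min pass, then abs-deviation pass) by a single online pass
-- over enumerate(signal) that retroactively corrects the total when a new minimum appears.

-- ===== PORT A =====
def greska (signal : List Int) : Int :=
  let m := (PySem.List.pyRange 0 signal.length 1).foldl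
    (fun m i => if PySem.List.pyGetD signal i 0 < m then PySem.List.pyGetD signal i 0 else m) 100
  (PySem.List.pyRange 0 signal.length 1).foldl
    (fun suma i => suma + |PySem.List.pyGetD signal i 0 - m|) 0

-- ===== PORT B =====
def greska_alt (signal : List Int) : Int :=
  ((PySem.List.enumerate signal 0).foldl
    (fun (st : Int × Int) (kx : Int × Int) =>
      let p := if kx.2 < st.1 then (kx.2, st.2 + kx.1 * (st.1 - kx.2)) else (st.1, st.2)
      (p.1, p.2 + kx.2 - p.1)) ((100 : Int), (0 : Int))).2

-- ===== PRECONDITION & SPEC =====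
def Spec_greska (signal : List Int) (out : Int) : Prop := out = greska_alt signal
instance (signal : List Int) (out : Int) : Decidable (Spec_greska signal out) := by unfold Spec_greska; infer_instance

-- ===== CLAIM (what is proved, stated in full; the proofs are below) =====
def Claim_equal_greska : Prop := ∀ (signal : List Int), Dom_greska signal → Spec_greska signal (greska signal)

-- ===== LEMMAS AND PROOFS =====

-- A's first loop is the running minimum, i.e. foldl min.
theorem greska_min_loop (signal : List Int) :
    signal.foldl (fun m x => if x < m then x else m) 100 = signal.foldl min 100 := by
  apply PySem.List.foldl_congr_mem
  intro acc x _
  simp [min_def]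
  omega

-- Sum of (x - m) over the list is sum - len * m.
theorem sum_sub_const (t : List Int) (m : Int) :
    (t.map (fun x => x - m)).sum = t.sum - t.length * m := by
  induction t with
  | nil => simp
  | cons x t ih => simp [ih]; ring

-- A equals the closed form sum - len * (running min).
theorem greska_closed (signal : List Int) :
    greska signal = signal.sum - signal.length * signal.foldl min 100 := by
  unfold greska
  rw [PySem.List.foldl_pyRange_zero_pyGetD' signal 0
        (f := fun m x => if x < m then x else m) (init := (100 : Int))]
  rw [greska_min_loop]
  set m := signal.foldl min 100 with hm
  have hle : ∀ x ∈ signal, m ≤ x := (PySem.List.foldl_min_le signal 100).2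
  rw [PySem.List.foldl_pyRange_zero_pyGetD' signal 0
        (f := fun suma x => suma + |x - m|) (init := (0 : Int))]
  have : signal.foldl (fun suma x => suma + |x - m|) 0
       = signal.foldl (fun suma x => suma + (x - m)) 0 := by
    apply PySem.List.foldl_congr_mem
    intro acc x hx
    rw [abs_of_nonneg (by have := hle x hx; omega)]
  rw [this, PySem.List.foldl_add (g := fun x => x - m), sum_sub_const]
  ring

-- Invariant of B's single pass: starting from index k and state (m, s), the fold returns
-- the final minimum and s corrected by k*(m - M') plus the deviations of the tail.
theorem alt_loop (t : List Int) : ∀ (k m s : Int),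
    (PySem.List.enumerate t k).foldl
      (fun (st : Int × Int) (kx : Int × Int) =>
        let p := if kx.2 < st.1 then (kx.2, st.2 + kx.1 * (st.1 - kx.2)) else (st.1, st.2)
        (p.1, p.2 + kx.2 - p.1)) (m, s)
    = (t.foldl min m, s + k * (m - t.foldl min m) + t.sum - t.length * t.foldl min m) := by
  induction t with
  | nil => intro k m s; simp [PySem.List.enumerate]
  | cons x t ih =>
    intro k m s
    rw [PySem.List.enumerate_cons, List.foldl_cons]
    by_cases h : x < m
    · simp only [h, if_true]
      rw [ih]
      have : min m x = x := by omega
      simp only [List.foldl_cons, this, List.length_cons, List.sum_cons]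
      simp only [Prod.mk.injEq]; exact ⟨trivial, by push_cast; ring⟩
    · simp only [h, if_false]
      rw [ih]
      have : min m x = m := by omega
      simp only [List.foldl_cons, this, List.length_cons, List.sum_cons]
      simp only [Prod.mk.injEq]; exact ⟨trivial, by push_cast; ring⟩

-- ===== VERDICT (by name: the statement is the Claim_ definition above) =====
theorem greska_spec : Claim_equal_greska := by
  intro signal _
  unfold Spec_greska greska_alt
  rw [alt_loop, greska_closed]
  ring
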